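-- pv_equiv track=rewrite | github.com/PyaeHeinTun/beta_bot | beta_bot/helper/logger.py | findMaxNumberOfKeys
-- ===== SOURCE A (Python) =====
-- def findMaxNumberOfKeys(future_predictions: dict) -> str:
--     max_keys = []
--     max_length = 0
--
--     # Iterate over each key-value pair in the dictionary
--     for key, value in future_predictions.items():
--         count = sum(1 for k in value.keys()
--                     if 0 <= k <= 60)
--         if count > max_length:
--             max_keys = [key]
--             max_length = count
--         elif count == max_length:
--             max_keys.append(key)
--     return max_keys[0]
-- ===== SOURCE B (Python) =====
-- def findMaxNumberOfKeys(future_predictions: dict) -> str: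
--     # Score every key once, then stable-sort descending by score: ties keep
--     # insertion order, so the first element is the first key with the max score.
--     scored = [(len([k for k in value if 0 <= k <= 60]), key)
--               for key, value in future_predictions.items()]
--     scored = sorted(scored, key=lambda p: p[0], reverse=True)
--     return scored[0][1]
-- ===== Notes on version B (the rewrite author's own statement) =====
-- stated objective: alternative
-- what changed: Replaces A's running-max scan with reset/append bookkeeping by a score-then-stable-sort pipeline: build (count,key) pairs in one map, sort them descending by count (stable, reverse=True), and take the first key.
-- outside the precondition, e.g. on findMaxNumberOfKeys({}): A raises IndexError, B raises IndexError
import Mathlib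
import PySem

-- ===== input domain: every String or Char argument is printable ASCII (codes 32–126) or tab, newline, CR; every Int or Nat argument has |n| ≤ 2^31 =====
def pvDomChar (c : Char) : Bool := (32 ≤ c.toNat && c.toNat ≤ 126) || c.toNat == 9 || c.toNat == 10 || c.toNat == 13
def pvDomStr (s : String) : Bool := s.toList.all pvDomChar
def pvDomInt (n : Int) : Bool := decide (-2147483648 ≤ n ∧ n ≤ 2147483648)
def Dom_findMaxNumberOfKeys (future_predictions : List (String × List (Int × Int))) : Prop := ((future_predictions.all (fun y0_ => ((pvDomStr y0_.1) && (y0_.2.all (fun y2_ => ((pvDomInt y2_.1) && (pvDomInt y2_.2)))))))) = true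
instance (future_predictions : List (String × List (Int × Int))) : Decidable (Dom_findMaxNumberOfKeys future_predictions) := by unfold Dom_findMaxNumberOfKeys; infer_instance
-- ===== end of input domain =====

-- B replaces A's running-max scan by "score each key, stable-sort descending, take the first";
-- objective: alternative decomposition (same result, similar cost).

-- ===== PORT A =====
-- `for k in value.keys()`: the dict's keys are the first occurrences, in order → PySem.List.dedup
def findMaxNumberOfKeys (future_predictions : List (String × List (Int × Int))) : String :=
  let st := future_predictions.foldl (fun (st : List String × Int) kv =>
      let count : Int := (PySem.List.dedup (kv.2.map Prod.fst)).foldl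
          (fun acc k => if 0 ≤ k ∧ k ≤ 60 then acc + 1 else acc) 0
      if count > st.2 then ([kv.1], count)
      else if count = st.2 then (st.1 ++ [kv.1], st.2)
      else st) ([], (0 : Int))
  (PySem.List.pyGet? st.1 0).getD ""   -- max_keys[0]; IndexError (empty dict) excluded by Pre_

-- ===== PORT B =====
def findMaxNumberOfKeys_alt (future_predictions : List (String × List (Int × Int))) : String :=
  let scored : List (Int × String) := future_predictions.map (fun kv =>
      ((((PySem.List.dedup (kv.2.map Prod.fst)).filter (fun k => decide (0 ≤ k ∧ k ≤ 60))).length : Int), kv.1))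
  let s := PySem.List.sorted scored Prod.fst true
  ((PySem.List.pyGet? s 0).map Prod.snd).getD ""   -- scored[0][1]; IndexError (empty dict) excluded by Pre_

-- ===== PRECONDITION & SPEC =====
-- Pre_ excludes the empty dict (A's max_keys[0] raises IndexError there, and so does B's scored[0])
-- and duplicate top-level keys, which a Python dict argument cannot hold.
def Pre_findMaxNumberOfKeys (future_predictions : List (String × List (Int × Int))) : Prop :=
  future_predictions ≠ [] ∧ (future_predictions.map Prod.fst).Nodup
instance (future_predictions : List (String × List (Int × Int))) : Decidable (Pre_findMaxNumberOfKeys future_predictions) := by unfold Pre_findMaxNumberOfKeys; infer_instance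

def pvWitness_findMaxNumberOfKeys : (List (String × List (Int × Int))) := [("a", [(0, 1)])]

def Spec_findMaxNumberOfKeys (future_predictions : List (String × List (Int × Int))) (out : String) : Prop := out = findMaxNumberOfKeys_alt future_predictions
instance (future_predictions : List (String × List (Int × Int))) (out : String) : Decidable (Spec_findMaxNumberOfKeys future_predictions out) := by unfold Spec_findMaxNumberOfKeys; infer_instance

-- ===== CLAIM (what is proved, stated in full; the proofs are below) =====
def Claim_equal_findMaxNumberOfKeys : Prop := ∀ (future_predictions : List (String × List (Int × Int))), Dom_findMaxNumberOfKeys future_predictions → Pre_findMaxNumberOfKeys future_predictions → Spec_findMaxNumberOfKeys future_predictions (findMaxNumberOfKeys future_predictions)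

-- ===== LEMMAS AND PROOFS =====

-- the score of one (key, value) entry: how many dict keys of the value lie in [0, 60]
def pvScore (kv : String × List (Int × Int)) : Int :=
  ((PySem.List.dedup (kv.2.map Prod.fst)).filter (fun k => decide (0 ≤ k ∧ k ≤ 60))).length

-- "keep the current leader unless the newcomer's score is strictly larger":
-- the common abstraction of A's reset/append rule and of stable descending insertion
def pvStep (o : Option (Int × String)) (p : Int × String) : Option (Int × String) :=
  match o with
  | none => some p
  | some q => if q.1 < p.1 then some p else some q

-- A's loop body, named
def pvAStep (st : List String × Int) (kv : String × List (Int × Int)) : List String × Int :=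
  let count : Int := (PySem.List.dedup (kv.2.map Prod.fst)).foldl
      (fun acc k => if 0 ≤ k ∧ k ≤ 60 then acc + 1 else acc) 0
  if count > st.2 then ([kv.1], count)
  else if count = st.2 then (st.1 ++ [kv.1], st.2)
  else st

theorem pvGet_zero {α : Type} (l : List α) : PySem.List.pyGet? l 0 = l.head? := by
  cases l <;> simp [PySem.List.pyGet?, PySem.List.pyIdx?]

theorem pvScore_nonneg (kv : String × List (Int × Int)) : 0 ≤ pvScore kv := by
  unfold pvScore; exact Int.natCast_nonneg _

theorem pvCount (l : List Int) (a : Int) :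
    l.foldl (fun acc k => if 0 ≤ k ∧ k ≤ 60 then acc + 1 else acc) a
      = a + ((l.filter (fun k => decide (0 ≤ k ∧ k ≤ 60))).length : Int) := by
  induction l generalizing a with
  | nil => simp
  | cons x t ih =>
    by_cases h : 0 ≤ x ∧ x ≤ 60 <;> simp [List.foldl, List.filter, h, ih] <;> omega

theorem pvAStep_eq (st : List String × Int) (kv : String × List (Int × Int)) :
    pvAStep st kv =
      if pvScore kv > st.2 then ([kv.1], pvScore kv)
      else if pvScore kv = st.2 then (st.1 ++ [kv.1], st.2)
      else st := by
  unfold pvAStep pvScore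
  rw [pvCount]
  simp

theorem pvHead_insert' (x : Int × String) (acc : List (Int × String)) :
    (PySem.List.insertBy (fun a b => decide (b.1 < a.1)) x acc).head?
      = pvStep acc.head? x := by
  cases acc with
  | nil => simp [PySem.List.insertBy, pvStep]
  | cons h t =>
    by_cases hlt : h.1 < x.1 <;>
      simp [PySem.List.insertBy, pvStep, hlt]

theorem pvHead_foldl (l : List (Int × String)) (acc : List (Int × String)) :
    (l.foldl (fun acc x => PySem.List.insertBy (fun a b => decide (b.1 < a.1)) x acc) acc).head?
      = l.foldl pvStep acc.head? := by
  induction l generalizing acc with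
  | nil => rfl
  | cons x t ih => simp only [List.foldl]; rw [ih, pvHead_insert']

def pvRel (mk : List String) (ml : Int) (o : Option (Int × String)) : Prop :=
  (o = none ∧ mk = [] ∧ ml = 0) ∨
  ∃ q, o = some q ∧ mk.head? = some q.2 ∧ ml = q.1 ∧ 0 ≤ q.1

theorem pvRel_step (mk : List String) (ml : Int) (o : Option (Int × String))
    (kv : String × List (Int × Int)) (h : pvRel mk ml o) :
    pvRel (pvAStep (mk, ml) kv).1 (pvAStep (mk, ml) kv).2 (pvStep o (pvScore kv, kv.1)) := by
  have hs := pvScore_nonneg kv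
  rw [pvAStep_eq]
  rcases h with ⟨ho, hmk, hml⟩ | ⟨q, ho, hh, hml, hq⟩
  · subst ho; subst hmk; subst hml
    by_cases hgt : pvScore kv > 0
    · right; exact ⟨(pvScore kv, kv.1), by simp [pvStep, hgt, hs]⟩
    · have he : pvScore kv = 0 := le_antisymm (not_lt.mp hgt) hs
      right; exact ⟨(pvScore kv, kv.1), by simp [pvStep, he]⟩
  · subst ho; subst hml
    by_cases hgt : pvScore kv > q.1
    · right
      exact ⟨(pvScore kv, kv.1), by simp [pvStep, hgt, le_trans hq (le_of_lt hgt)]⟩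
    · have hnlt : ¬ q.1 < pvScore kv := hgt
      by_cases he : pvScore kv = q.1
      · right
        refine ⟨q, by simp [pvStep, hnlt], ?_, by simp [hgt, he], hq⟩
        cases mk with
        | nil => simp at hh
        | cons a t => simpa [hgt, he] using hh
      · right; exact ⟨q, by simp [pvStep, hnlt], by simpa [hgt, he] using hh, by simp [hgt, he], hq⟩

theorem pvRel_foldl (l : List (String × List (Int × Int))) (mk : List String) (ml : Int)
    (o : Option (Int × String)) (h : pvRel mk ml o) :
    pvRel (l.foldl pvAStep (mk, ml)).1 (l.foldl pvAStep (mk, ml)).2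
      ((l.map (fun kv => (pvScore kv, kv.1))).foldl pvStep o) := by
  induction l generalizing mk ml o with
  | nil => exact h
  | cons kv t ih =>
    simp only [List.foldl, List.map]
    have h' := pvRel_step mk ml o kv h
    have : pvAStep (mk, ml) kv = ((pvAStep (mk, ml) kv).1, (pvAStep (mk, ml) kv).2) := rfl
    rw [this]
    exact ih _ _ _ h'

theorem pvFoldl_pvStep_some (t : List (Int × String)) (q : Int × String) :
    ∃ r, t.foldl pvStep (some q) = some r := by
  induction t generalizing q with
  | nil => exact ⟨q, rfl⟩
  | cons x s ih =>
    simp only [List.foldl, pvStep]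
    split <;> exact ih _

-- ===== VERDICT (by name: the statement is the Claim_ definition above) =====
theorem findMaxNumberOfKeys_spec : Claim_equal_findMaxNumberOfKeys := by
  intro fp _ hpre
  obtain ⟨hne, _⟩ := hpre
  unfold Spec_findMaxNumberOfKeys findMaxNumberOfKeys findMaxNumberOfKeys_alt
  simp only []
  -- name the scored list
  set scored : List (Int × String) := fp.map (fun kv => (pvScore kv, kv.1)) with hsc
  -- the fold of pvStep over scored is some r
  obtain ⟨r, hr⟩ : ∃ r, scored.foldl pvStep none = some r := by
    cases fp with
    | nil => exact absurd rfl hne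
    | cons kv t =>
      simp only [hsc, List.map, List.foldl, pvStep]
      exact pvFoldl_pvStep_some _ _
  -- A's side
  have hA : pvRel (fp.foldl pvAStep ([], 0)).1 (fp.foldl pvAStep ([], 0)).2 (some r) := by
    have h0 := pvRel_foldl fp [] 0 none (Or.inl ⟨rfl, rfl, rfl⟩)
    rw [← hsc] at h0
    rw [← hr]
    exact h0
  have hAhead : (fp.foldl pvAStep ([], 0)).1.head? = some r.2 := by
    rcases hA with ⟨ho, _, _⟩ | ⟨q, hq, hh, _, _⟩
    · cases ho
    · cases hq; exact hh
  -- B's side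
  have hB : (PySem.List.sorted scored Prod.fst true).head? = some r := by
    rw [PySem.List.sorted_rev_eq_foldl_insertBy]
    have := pvHead_foldl scored []
    simpa [hr] using this
  rw [pvGet_zero, pvGet_zero]
  rw [hsc] at hB
  simp only [pvScore] at hB
  show ((fp.foldl pvAStep ([], 0)).1.head?).getD "" = _
  rw [hAhead, hB]
  rfl
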